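-- pv_equiv track=rewrite | github.com/Pollysoma/protein-prediction-project-2 | src/membership_splits/taxonomy.py | classify_lineage_list
-- ===== SOURCE A (Python) =====
-- from typing import Dict, List, Tuple
--
-- def classify_lineage_list(lineage_list: List[str]) -> str:
--     """
--     Determines kingdom from a list of taxonomic names.
--     Example: ['Bacteria', 'Actinomycetota', ...] -> 'Bacteria'
--     """
--     names = {n.lower() for n in lineage_list}
--
--     if "metazoa" in names or "animalia" in names:
--         return "Metazoa"
--     if "viridiplantae" in names or "plantae" in names:
--         return "Viridiplantae"
--     if "fungi" in names:
--         return "Fungi"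
--     if "bacteria" in names:
--         return "Bacteria"
--     if "archaea" in names:
--         return "Archaea"
--     if "viruses" in names:
--         return "Viruses"
--     if "eukaryota" in names:
--         return "Other Eukaryota"
--     return "Unknown"
-- ===== SOURCE B (Python) =====
-- # Single pass with a static keyword -> (priority, kingdom) table, tracking the minimum priority seen.
-- _TABLE = {
--     "metazoa": (0, "Metazoa"), "animalia": (0, "Metazoa"),
--     "viridiplantae": (1, "Viridiplantae"), "plantae": (1, "Viridiplantae"),
--     "fungi": (2, "Fungi"),
--     "bacteria": (3, "Bacteria"),
--     "archaea": (4, "Archaea"),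
--     "viruses": (5, "Viruses"),
--     "eukaryota": (6, "Other Eukaryota"),
-- }
--
-- def classify_lineage_list(lineage_list):
--     best = (7, "Unknown")
--     for n in lineage_list:
--         hit = _TABLE.get(n.lower())
--         if hit is not None and hit[0] < best[0]:
--             best = hit
--     return best[1]
-- ===== Notes on version B (the rewrite author's own statement) =====
-- stated objective: alternative
-- what changed: Replaces building a set of lowercased names plus an ordered chain of membership branches with a single scan that looks each lowercased name up in a static priority table and keeps the minimum-priority match.
import Mathlib
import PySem

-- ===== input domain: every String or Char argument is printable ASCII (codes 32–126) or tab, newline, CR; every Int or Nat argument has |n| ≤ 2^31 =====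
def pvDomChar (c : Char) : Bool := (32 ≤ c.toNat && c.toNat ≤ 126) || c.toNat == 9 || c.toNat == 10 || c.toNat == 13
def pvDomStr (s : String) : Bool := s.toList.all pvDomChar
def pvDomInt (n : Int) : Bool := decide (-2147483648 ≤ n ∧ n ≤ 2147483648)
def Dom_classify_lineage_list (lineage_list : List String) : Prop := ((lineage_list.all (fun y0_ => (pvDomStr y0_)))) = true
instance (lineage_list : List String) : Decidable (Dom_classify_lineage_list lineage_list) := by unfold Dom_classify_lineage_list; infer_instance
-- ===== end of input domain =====

-- B replaces A's set-plus-ordered-membership-branches with one scan keeping the minimum-priority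
-- table match; same cost, different decomposition (objective: alternative).


-- ===== PORT A =====
def classify_lineage_list (lineage_list : List String) : String :=
  let names : PySem.Set String := PySem.Set.ofList (lineage_list.map (fun n => PySem.Str.lower n))
  if PySem.Set.contains names "metazoa" || PySem.Set.contains names "animalia" then "Metazoa"
  else if PySem.Set.contains names "viridiplantae" || PySem.Set.contains names "plantae" then "Viridiplantae"
  else if PySem.Set.contains names "fungi" then "Fungi"
  else if PySem.Set.contains names "bacteria" then "Bacteria"
  else if PySem.Set.contains names "archaea" then "Archaea"
  else if PySem.Set.contains names "viruses" then "Viruses"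
  else if PySem.Set.contains names "eukaryota" then "Other Eukaryota"
  else "Unknown"

-- ===== PORT B =====
-- the static _TABLE of Source B
def pvTable : PySem.Dict String (Int × String) := PySem.Dict.ofList
  [("metazoa", (0, "Metazoa")), ("animalia", (0, "Metazoa")),
   ("viridiplantae", (1, "Viridiplantae")), ("plantae", (1, "Viridiplantae")),
   ("fungi", (2, "Fungi")), ("bacteria", (3, "Bacteria")), ("archaea", (4, "Archaea")),
   ("viruses", (5, "Viruses")), ("eukaryota", (6, "Other Eukaryota"))]

def classify_lineage_list_alt (lineage_list : List String) : String :=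
  (lineage_list.foldl
    (fun best n =>
      match pvTable.get? (PySem.Str.lower n) with
      | some hit => if hit.1 < best.1 then hit else best
      | none => best)
    ((7 : Int), "Unknown")).2

-- ===== PRECONDITION & SPEC =====
def Spec_classify_lineage_list (lineage_list : List String) (out : String) : Prop := out = classify_lineage_list_alt lineage_list
instance (lineage_list : List String) (out : String) : Decidable (Spec_classify_lineage_list lineage_list out) := by unfold Spec_classify_lineage_list; infer_instance

-- ===== CLAIM (what is proved, stated in full; the proofs are below) =====
def Claim_equal_classify_lineage_list : Prop := ∀ (lineage_list : List String), Dom_classify_lineage_list lineage_list → Spec_classify_lineage_list lineage_list (classify_lineage_list lineage_list)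

-- ===== LEMMAS AND PROOFS =====

-- priority → kingdom (proof-side abstraction shared by both characterisations)
def pvKingdomOf (p : Int) : String :=
  if p = 0 then "Metazoa" else if p = 1 then "Viridiplantae" else if p = 2 then "Fungi"
  else if p = 3 then "Bacteria" else if p = 4 then "Archaea" else if p = 5 then "Viruses"
  else if p = 6 then "Other Eukaryota" else "Unknown"

-- priority of one lineage name (7 = no keyword)
def pvG (n : String) : Int := ((pvTable.get? (PySem.Str.lower n)).map Prod.fst).getD 7

-- minimum priority of a list
def pvM : List String → Int
  | [] => 7
  | n :: t => min (pvG n) (pvM t)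

set_option maxRecDepth 8192 in
theorem pvTable_get?_eq (s : String) : pvTable.get? s =
    if s = "metazoa" then some (0, "Metazoa") else if s = "animalia" then some (0, "Metazoa")
    else if s = "viridiplantae" then some (1, "Viridiplantae") else if s = "plantae" then some (1, "Viridiplantae")
    else if s = "fungi" then some (2, "Fungi") else if s = "bacteria" then some (3, "Bacteria")
    else if s = "archaea" then some (4, "Archaea") else if s = "viruses" then some (5, "Viruses")
    else if s = "eukaryota" then some (6, "Other Eukaryota") else none := by
  have hi : pvTable.items = [("metazoa", ((0 : Int), "Metazoa")), ("animalia", (0, "Metazoa")),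
    ("viridiplantae", (1, "Viridiplantae")), ("plantae", (1, "Viridiplantae")),
    ("fungi", (2, "Fungi")), ("bacteria", (3, "Bacteria")), ("archaea", (4, "Archaea")),
    ("viruses", (5, "Viruses")), ("eukaryota", (6, "Other Eukaryota"))] := by rfl
  split_ifs with h1 h2 h3 h4 h5 h6 h7 h8 h9
  · subst h1; rfl
  · subst h2; rfl
  · subst h3; rfl
  · subst h4; rfl
  · subst h5; rfl
  · subst h6; rfl
  · subst h7; rfl
  · subst h8; rfl
  · subst h9; rfl
  · have n1 : ("metazoa" == s) = false := beq_eq_false_iff_ne.mpr (Ne.symm h1)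
    have n2 : ("animalia" == s) = false := beq_eq_false_iff_ne.mpr (Ne.symm h2)
    have n3 : ("viridiplantae" == s) = false := beq_eq_false_iff_ne.mpr (Ne.symm h3)
    have n4 : ("plantae" == s) = false := beq_eq_false_iff_ne.mpr (Ne.symm h4)
    have n5 : ("fungi" == s) = false := beq_eq_false_iff_ne.mpr (Ne.symm h5)
    have n6 : ("bacteria" == s) = false := beq_eq_false_iff_ne.mpr (Ne.symm h6)
    have n7 : ("archaea" == s) = false := beq_eq_false_iff_ne.mpr (Ne.symm h7)
    have n8 : ("viruses" == s) = false := beq_eq_false_iff_ne.mpr (Ne.symm h8)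
    have n9 : ("eukaryota" == s) = false := beq_eq_false_iff_ne.mpr (Ne.symm h9)
    simp [PySem.Dict.get?, hi, List.find?, n1, n2, n3, n4, n5, n6, n7, n8, n9]

theorem pvG_eq (n : String) : pvG n =
    if PySem.Str.lower n = "metazoa" then 0 else if PySem.Str.lower n = "animalia" then 0
    else if PySem.Str.lower n = "viridiplantae" then 1 else if PySem.Str.lower n = "plantae" then 1
    else if PySem.Str.lower n = "fungi" then 2 else if PySem.Str.lower n = "bacteria" then 3
    else if PySem.Str.lower n = "archaea" then 4 else if PySem.Str.lower n = "viruses" then 5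
    else if PySem.Str.lower n = "eukaryota" then 6 else 7 := by
  unfold pvG
  rw [pvTable_get?_eq]
  split_ifs <;> rfl

theorem pvG_nonneg (n : String) : 0 ≤ pvG n := by
  rw [pvG_eq]; split_ifs <;> omega

theorem pvM_le7 (l : List String) : pvM l ≤ 7 := by
  induction l with
  | nil => simp [pvM]
  | cons n t ih => simp only [pvM]; omega

theorem pvM_nonneg (l : List String) : 0 ≤ pvM l := by
  induction l with
  | nil => simp [pvM]
  | cons n t ih => have := pvG_nonneg n; simp only [pvM]; omega

theorem pvM_le_iff (l : List String) (k : Int) (hk : k < 7) :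
    pvM l ≤ k ↔ ∃ n ∈ l, pvG n ≤ k := by
  induction l with
  | nil => simp [pvM]; omega
  | cons n t ih =>
    simp only [pvM, List.mem_cons, min_le_iff, ih]
    constructor
    · rintro (h | ⟨m, hm, hg⟩)
      · exact ⟨n, Or.inl rfl, h⟩
      · exact ⟨m, Or.inr hm, hg⟩
    · rintro ⟨m, (rfl | hm), hg⟩
      · exact Or.inl hg
      · exact Or.inr ⟨m, hm, hg⟩

-- membership condition of A ↔ existence of a name lowering to the keyword
theorem pvMem_iff (l : List String) (kw : String) :
    PySem.Set.contains (PySem.Set.ofList (l.map (fun n => PySem.Str.lower n))) kw = true ↔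
      ∃ n ∈ l, PySem.Str.lower n = kw := by
  simp [PySem.Set.mem_ofList]


-- B computes pvKingdomOf (pvM l)
theorem pvTable_sound (s : String) (h : Int × String) (hh : pvTable.get? s = some h) :
    h.2 = pvKingdomOf h.1 ∧ 0 ≤ h.1 ∧ h.1 ≤ 6 := by
  rw [pvTable_get?_eq] at hh
  split_ifs at hh
  all_goals injection hh with hh
  all_goals subst hh
  all_goals exact ⟨by decide, by decide, by decide⟩

theorem pvFold (l : List String) : ∀ m : Int, m ≤ 7 →
    l.foldl (fun best n =>
      match pvTable.get? (PySem.Str.lower n) with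
      | some hit => if hit.1 < best.1 then hit else best
      | none => best) (m, pvKingdomOf m)
      = (min m (pvM l), pvKingdomOf (min m (pvM l))) := by
  induction l with
  | nil => intro m hm; simp [pvM, min_eq_left hm]
  | cons n t ih =>
    intro m hm
    cases hg : pvTable.get? (PySem.Str.lower n) with
    | none =>
      have hg7 : pvG n = 7 := by simp [pvG, hg]
      simp only [List.foldl_cons, hg]
      rw [ih m hm, show min m (pvM t) = min m (pvM (n :: t)) from by
        simp only [pvM, hg7]; omega]
    | some h =>
      obtain ⟨hk, hpos, hle⟩ := pvTable_sound _ _ hg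
      have hgn : pvG n = h.1 := by simp [pvG, hg]
      have hMt := pvM_le7 t
      by_cases hlt : h.1 < m
      · have hpair : h = (h.1, pvKingdomOf h.1) := by rw [← hk]
        simp only [List.foldl_cons, hg, if_pos hlt]
        rw [hpair, ih h.1 (by omega),
          show min h.1 (pvM t) = min m (pvM (n :: t)) from by
            simp only [pvM, hgn]; omega]
      · simp only [List.foldl_cons, hg, if_neg hlt]
        rw [ih m hm, show min m (pvM t) = min m (pvM (n :: t)) from by
          simp only [pvM, hgn]; omega]

theorem pvB_eq (l : List String) : classify_lineage_list_alt l = pvKingdomOf (pvM l) := by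
  unfold classify_lineage_list_alt
  rw [show ((7 : Int), "Unknown") = ((7 : Int), pvKingdomOf 7) from rfl,
    pvFold l 7 le_rfl,
    show min (7 : Int) (pvM l) = pvM l from by have := pvM_le7 l; omega]

-- per-priority characterisation of pvG
theorem pvG0_iff (n : String) : pvG n = 0 ↔
    (PySem.Str.lower n = "metazoa" ∨ PySem.Str.lower n = "animalia") := by
  rw [pvG_eq]; split_ifs <;> simp_all
theorem pvG1_iff (n : String) : pvG n = 1 ↔
    (PySem.Str.lower n = "viridiplantae" ∨ PySem.Str.lower n = "plantae") := by
  rw [pvG_eq]; split_ifs <;> simp_all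
theorem pvG2_iff (n : String) : pvG n = 2 ↔ PySem.Str.lower n = "fungi" := by
  rw [pvG_eq]; split_ifs <;> simp_all
theorem pvG3_iff (n : String) : pvG n = 3 ↔ PySem.Str.lower n = "bacteria" := by
  rw [pvG_eq]; split_ifs <;> simp_all
theorem pvG4_iff (n : String) : pvG n = 4 ↔ PySem.Str.lower n = "archaea" := by
  rw [pvG_eq]; split_ifs <;> simp_all
theorem pvG5_iff (n : String) : pvG n = 5 ↔ PySem.Str.lower n = "viruses" := by
  rw [pvG_eq]; split_ifs <;> simp_all
theorem pvG6_iff (n : String) : pvG n = 6 ↔ PySem.Str.lower n = "eukaryota" := by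
  rw [pvG_eq]; split_ifs <;> simp_all

-- A's branch conditions ↔ existence of the corresponding priority
theorem pvCond0_iff (l : List String) :
    (PySem.Set.contains (PySem.Set.ofList (l.map (fun n => PySem.Str.lower n))) "metazoa" ||
     PySem.Set.contains (PySem.Set.ofList (l.map (fun n => PySem.Str.lower n))) "animalia") = true ↔
      ∃ n ∈ l, pvG n = 0 := by
  simp only [Bool.or_eq_true, pvMem_iff, pvG0_iff]
  constructor
  · rintro (⟨n, hn, h⟩ | ⟨n, hn, h⟩)
    · exact ⟨n, hn, Or.inl h⟩
    · exact ⟨n, hn, Or.inr h⟩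
  · rintro ⟨n, hn, h | h⟩
    · exact Or.inl ⟨n, hn, h⟩
    · exact Or.inr ⟨n, hn, h⟩
theorem pvCond1_iff (l : List String) :
    (PySem.Set.contains (PySem.Set.ofList (l.map (fun n => PySem.Str.lower n))) "viridiplantae" ||
     PySem.Set.contains (PySem.Set.ofList (l.map (fun n => PySem.Str.lower n))) "plantae") = true ↔
      ∃ n ∈ l, pvG n = 1 := by
  simp only [Bool.or_eq_true, pvMem_iff, pvG1_iff]
  constructor
  · rintro (⟨n, hn, h⟩ | ⟨n, hn, h⟩)
    · exact ⟨n, hn, Or.inl h⟩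
    · exact ⟨n, hn, Or.inr h⟩
  · rintro ⟨n, hn, h | h⟩
    · exact Or.inl ⟨n, hn, h⟩
    · exact Or.inr ⟨n, hn, h⟩
theorem pvCond2_iff (l : List String) :
    PySem.Set.contains (PySem.Set.ofList (l.map (fun n => PySem.Str.lower n))) "fungi" = true ↔
      ∃ n ∈ l, pvG n = 2 := by
  simp only [pvMem_iff, pvG2_iff]
theorem pvCond3_iff (l : List String) :
    PySem.Set.contains (PySem.Set.ofList (l.map (fun n => PySem.Str.lower n))) "bacteria" = true ↔
      ∃ n ∈ l, pvG n = 3 := by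
  simp only [pvMem_iff, pvG3_iff]
theorem pvCond4_iff (l : List String) :
    PySem.Set.contains (PySem.Set.ofList (l.map (fun n => PySem.Str.lower n))) "archaea" = true ↔
      ∃ n ∈ l, pvG n = 4 := by
  simp only [pvMem_iff, pvG4_iff]
theorem pvCond5_iff (l : List String) :
    PySem.Set.contains (PySem.Set.ofList (l.map (fun n => PySem.Str.lower n))) "viruses" = true ↔
      ∃ n ∈ l, pvG n = 5 := by
  simp only [pvMem_iff, pvG5_iff]
theorem pvCond6_iff (l : List String) :
    PySem.Set.contains (PySem.Set.ofList (l.map (fun n => PySem.Str.lower n))) "eukaryota" = true ↔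
      ∃ n ∈ l, pvG n = 6 := by
  simp only [pvMem_iff, pvG6_iff]

theorem pvM_le_mem (l : List String) (n : String) (hn : n ∈ l) : pvM l ≤ pvG n := by
  induction l with
  | nil => cases hn
  | cons a t ih =>
    rcases List.mem_cons.mp hn with rfl | hn
    · simp only [pvM]; omega
    · have := ih hn; simp only [pvM]; omega

theorem pvM_attained (l : List String) (h : pvM l ≤ 6) : ∃ n ∈ l, pvG n = pvM l := by
  obtain ⟨n, hn, hg⟩ := (pvM_le_iff l (pvM l) (by omega)).mp le_rfl
  exact ⟨n, hn, le_antisymm hg (pvM_le_mem l n hn)⟩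

-- A computes pvKingdomOf (pvM l)
theorem pvA_eq (l : List String) : classify_lineage_list l = pvKingdomOf (pvM l) := by
  have h0 := pvM_nonneg l
  have h7 := pvM_le7 l
  simp only [classify_lineage_list]
  split_ifs with h1 h2 h3 h4 h5 h6 hE
  · obtain ⟨n, hn, hg⟩ := (pvCond0_iff l).mp h1
    have := pvM_le_mem l n hn
    rw [show pvM l = 0 from by omega]; rfl
  · obtain ⟨n, hn, hg⟩ := (pvCond1_iff l).mp h2
    have hle := pvM_le_mem l n hn
    have hne0 : pvM l ≠ 0 := fun he =>
      h1 ((pvCond0_iff l).mpr (by rw [← he]; exact pvM_attained l (by omega)))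
    rw [show pvM l = 1 from by omega]; rfl
  · obtain ⟨n, hn, hg⟩ := (pvCond2_iff l).mp h3
    have hle := pvM_le_mem l n hn
    have hne0 : pvM l ≠ 0 := fun he =>
      h1 ((pvCond0_iff l).mpr (by rw [← he]; exact pvM_attained l (by omega)))
    have hne1 : pvM l ≠ 1 := fun he =>
      h2 ((pvCond1_iff l).mpr (by rw [← he]; exact pvM_attained l (by omega)))
    rw [show pvM l = 2 from by omega]; rfl
  · obtain ⟨n, hn, hg⟩ := (pvCond3_iff l).mp h4
    have hle := pvM_le_mem l n hn
    have hne0 : pvM l ≠ 0 := fun he =>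
      h1 ((pvCond0_iff l).mpr (by rw [← he]; exact pvM_attained l (by omega)))
    have hne1 : pvM l ≠ 1 := fun he =>
      h2 ((pvCond1_iff l).mpr (by rw [← he]; exact pvM_attained l (by omega)))
    have hne2 : pvM l ≠ 2 := fun he =>
      h3 ((pvCond2_iff l).mpr (by rw [← he]; exact pvM_attained l (by omega)))
    rw [show pvM l = 3 from by omega]; rfl
  · obtain ⟨n, hn, hg⟩ := (pvCond4_iff l).mp h5
    have hle := pvM_le_mem l n hn
    have hne0 : pvM l ≠ 0 := fun he =>
      h1 ((pvCond0_iff l).mpr (by rw [← he]; exact pvM_attained l (by omega)))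
    have hne1 : pvM l ≠ 1 := fun he =>
      h2 ((pvCond1_iff l).mpr (by rw [← he]; exact pvM_attained l (by omega)))
    have hne2 : pvM l ≠ 2 := fun he =>
      h3 ((pvCond2_iff l).mpr (by rw [← he]; exact pvM_attained l (by omega)))
    have hne3 : pvM l ≠ 3 := fun he =>
      h4 ((pvCond3_iff l).mpr (by rw [← he]; exact pvM_attained l (by omega)))
    rw [show pvM l = 4 from by omega]; rfl
  · obtain ⟨n, hn, hg⟩ := (pvCond5_iff l).mp h6
    have hle := pvM_le_mem l n hn
    have hne0 : pvM l ≠ 0 := fun he =>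
      h1 ((pvCond0_iff l).mpr (by rw [← he]; exact pvM_attained l (by omega)))
    have hne1 : pvM l ≠ 1 := fun he =>
      h2 ((pvCond1_iff l).mpr (by rw [← he]; exact pvM_attained l (by omega)))
    have hne2 : pvM l ≠ 2 := fun he =>
      h3 ((pvCond2_iff l).mpr (by rw [← he]; exact pvM_attained l (by omega)))
    have hne3 : pvM l ≠ 3 := fun he =>
      h4 ((pvCond3_iff l).mpr (by rw [← he]; exact pvM_attained l (by omega)))
    have hne4 : pvM l ≠ 4 := fun he =>
      h5 ((pvCond4_iff l).mpr (by rw [← he]; exact pvM_attained l (by omega)))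
    rw [show pvM l = 5 from by omega]; rfl
  · obtain ⟨n, hn, hg⟩ := (pvCond6_iff l).mp hE
    have hle := pvM_le_mem l n hn
    have hne0 : pvM l ≠ 0 := fun he =>
      h1 ((pvCond0_iff l).mpr (by rw [← he]; exact pvM_attained l (by omega)))
    have hne1 : pvM l ≠ 1 := fun he =>
      h2 ((pvCond1_iff l).mpr (by rw [← he]; exact pvM_attained l (by omega)))
    have hne2 : pvM l ≠ 2 := fun he =>
      h3 ((pvCond2_iff l).mpr (by rw [← he]; exact pvM_attained l (by omega)))
    have hne3 : pvM l ≠ 3 := fun he =>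
      h4 ((pvCond3_iff l).mpr (by rw [← he]; exact pvM_attained l (by omega)))
    have hne4 : pvM l ≠ 4 := fun he =>
      h5 ((pvCond4_iff l).mpr (by rw [← he]; exact pvM_attained l (by omega)))
    have hne5 : pvM l ≠ 5 := fun he =>
      h6 ((pvCond5_iff l).mpr (by rw [← he]; exact pvM_attained l (by omega)))
    rw [show pvM l = 6 from by omega]; rfl
  · have hm7 : pvM l = 7 := by
      by_contra hne
      have hle6 : pvM l ≤ 6 := by omega
      obtain ⟨n, hn, hg⟩ := pvM_attained l hle6
      have : pvM l = 0 ∨ pvM l = 1 ∨ pvM l = 2 ∨ pvM l = 3 ∨ pvM l = 4 ∨ pvM l = 5 ∨ pvM l = 6 := by omega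
      rcases this with he | he | he | he | he | he | he
      · exact h1 ((pvCond0_iff l).mpr ⟨n, hn, by omega⟩)
      · exact h2 ((pvCond1_iff l).mpr ⟨n, hn, by omega⟩)
      · exact h3 ((pvCond2_iff l).mpr ⟨n, hn, by omega⟩)
      · exact h4 ((pvCond3_iff l).mpr ⟨n, hn, by omega⟩)
      · exact h5 ((pvCond4_iff l).mpr ⟨n, hn, by omega⟩)
      · exact h6 ((pvCond5_iff l).mpr ⟨n, hn, by omega⟩)
      · exact hE ((pvCond6_iff l).mpr ⟨n, hn, by omega⟩)
    rw [hm7]; rfl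

-- ===== VERDICT (by name: the statement is the Claim_ definition above) =====
theorem classify_lineage_list_spec : Claim_equal_classify_lineage_list := by
  intro l _
  unfold Spec_classify_lineage_list
  rw [pvA_eq, pvB_eq]
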